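-- pv_equiv track=rewrite | github.com/anjieyang/tuberculosis-transmission-predictor | src/utils/Utils.py | get_moved_border
-- ===== SOURCE A (Python) =====
-- def get_moved_border(border, direction, distance):
--     moved = []
--     for point in border:
--         point = list(point)
--         if direction == 'left':
--             point[0] -= distance
--         elif direction == 'right':
--             point[0] += distance
--         elif direction == 'up':
--             point[1] += distance
--         elif direction == 'down':
--             point[1] -= distance
--         elif direction == 'left_up':
--             point[0] -= distance
--             point[1] += distance
--         elif direction == 'left_down':
--             point[0] -= distance
--             point[1] -= distance
--         elif direction == 'right_up':
--             point[0] += distance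
--             point[1] += distance
--         elif direction == 'right_down':
--             point[0] += distance
--             point[1] -= distance
--         moved.append(tuple(point))
--     return moved
-- ===== SOURCE B (Python) =====
-- def get_moved_border(border, direction, distance):
--     # Staged axis passes: apply the horizontal component to the whole list,
--     # then the vertical component, instead of an 8-way branch per point.
--     moved = [tuple(p) for p in border]
--     if direction in ('left', 'left_up', 'left_down'):
--         moved = [(x - distance, y) for x, y in moved]
--     elif direction in ('right', 'right_up', 'right_down'):
--         moved = [(x + distance, y) for x, y in moved]
--     if direction in ('up', 'left_up', 'right_up'):
--         moved = [(x, y + distance) for x, y in moved]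
--     elif direction in ('down', 'left_down', 'right_down'):
--         moved = [(x, y - distance) for x, y in moved]
--     return moved
-- ===== Notes on version B (the rewrite author's own statement) =====
-- stated objective: alternative
-- what changed: Replaces A's single loop with an 8-way if/elif branch executed per point by a staged axis decomposition: the direction's horizontal component is applied in one whole-list pass and its vertical component in a second pass, with all direction tests done once outside the loops.
import Mathlib
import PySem

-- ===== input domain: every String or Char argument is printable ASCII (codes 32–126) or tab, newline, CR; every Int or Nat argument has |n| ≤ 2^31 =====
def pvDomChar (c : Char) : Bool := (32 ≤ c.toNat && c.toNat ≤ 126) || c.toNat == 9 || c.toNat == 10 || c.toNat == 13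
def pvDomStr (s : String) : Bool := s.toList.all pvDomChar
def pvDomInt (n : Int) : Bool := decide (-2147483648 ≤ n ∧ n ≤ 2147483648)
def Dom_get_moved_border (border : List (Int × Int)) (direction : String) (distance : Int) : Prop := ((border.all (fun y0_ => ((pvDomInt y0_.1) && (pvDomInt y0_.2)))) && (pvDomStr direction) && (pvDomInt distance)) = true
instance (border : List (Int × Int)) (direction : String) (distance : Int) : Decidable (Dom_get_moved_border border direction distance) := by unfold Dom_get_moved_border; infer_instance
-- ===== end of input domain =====

-- B replaces A's per-point 8-way if/elif branch by a staged axis decomposition: one whole-list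
-- pass for the direction's horizontal component, then one for its vertical component (alternative).


-- ===== PORT A =====
def get_moved_border (border : List (Int × Int)) (direction : String) (distance : Int) : List (Int × Int) :=
  border.foldl (fun moved point =>
    let p : Int × Int :=
      if direction == "left" then (point.1 - distance, point.2)
      else if direction == "right" then (point.1 + distance, point.2)
      else if direction == "up" then (point.1, point.2 + distance)
      else if direction == "down" then (point.1, point.2 - distance)
      else if direction == "left_up" then (point.1 - distance, point.2 + distance)
      else if direction == "left_down" then (point.1 - distance, point.2 - distance)
      else if direction == "right_up" then (point.1 + distance, point.2 + distance)
      else if direction == "right_down" then (point.1 + distance, point.2 - distance)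
      else point
    moved ++ [p]) []

-- ===== PORT B =====
def get_moved_border_alt (border : List (Int × Int)) (direction : String) (distance : Int) : List (Int × Int) :=
  let moved0 := border.map (fun p => (p.1, p.2))
  let moved1 :=
    if direction == "left" || direction == "left_up" || direction == "left_down" then
      moved0.map (fun p => (p.1 - distance, p.2))
    else if direction == "right" || direction == "right_up" || direction == "right_down" then
      moved0.map (fun p => (p.1 + distance, p.2))
    else moved0
  if direction == "up" || direction == "left_up" || direction == "right_up" then
    moved1.map (fun p => (p.1, p.2 + distance))
  else if direction == "down" || direction == "left_down" || direction == "right_down" then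
    moved1.map (fun p => (p.1, p.2 - distance))
  else moved1

-- ===== PRECONDITION & SPEC =====
def Spec_get_moved_border (border : List (Int × Int)) (direction : String) (distance : Int) (out : List (Int × Int)) : Prop := out = get_moved_border_alt border direction distance
instance (border : List (Int × Int)) (direction : String) (distance : Int) (out : List (Int × Int)) : Decidable (Spec_get_moved_border border direction distance out) := by unfold Spec_get_moved_border; infer_instance

-- ===== CLAIM (what is proved, stated in full; the proofs are below) =====
def Claim_equal_get_moved_border : Prop := ∀ (border : List (Int × Int)) (direction : String) (distance : Int), Dom_get_moved_border border direction distance → Spec_get_moved_border border direction distance (get_moved_border border direction distance)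

-- ===== LEMMAS AND PROOFS =====

-- A's append-accumulator fold is the map of the per-point function.
theorem foldl_append_map {α β : Type} (f : α → β) (l : List α) (acc : List β) :
    l.foldl (fun m p => m ++ [f p]) acc = acc ++ l.map f := by
  induction l generalizing acc with
  | nil => simp
  | cons x xs ih => simp [List.foldl, ih]

-- ===== VERDICT (by name: the statement is the Claim_ definition above) =====
theorem get_moved_border_spec : Claim_equal_get_moved_border := by
  intro border direction distance _
  unfold Spec_get_moved_border get_moved_border get_moved_border_alt
  rw [foldl_append_map]
  simp only [List.nil_append]
  by_cases h1 : direction = "left"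
  · subst h1; simp
  by_cases h2 : direction = "right"
  · subst h2; simp
  by_cases h3 : direction = "up"
  · subst h3; simp
  by_cases h4 : direction = "down"
  · subst h4; simp
  by_cases h5 : direction = "left_up"
  · subst h5; simp [List.map_map, Function.comp]
  by_cases h6 : direction = "left_down"
  · subst h6; simp [List.map_map, Function.comp]
  by_cases h7 : direction = "right_up"
  · subst h7; simp [List.map_map, Function.comp]
  by_cases h8 : direction = "right_down"
  · subst h8; simp [List.map_map, Function.comp]
  simp [h1, h2, h3, h4, h5, h6, h7, h8]
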